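-- pv_equiv track=rewrite | github.com/FOCCms/gb-python | homework3/task2.py | prod_list
-- ===== SOURCE A (Python) =====
-- def prod_list(numbers):
--     prod = []
--     while len(numbers) > 0:
--         first_element = numbers.pop(0)
--         if len(numbers) > 0:
--             prod.append(first_element * numbers.pop())
--         else:
--             prod.append(first_element * first_element)
--     return prod
-- ===== SOURCE B (Python) =====
-- def prod_list(numbers):
--     res = []
--     i, j = 0, len(numbers) - 1
--     while i < j:
--         res.append(numbers[i] * numbers[j])
--         i += 1
--         j -= 1
--     if i == j:
--         res.append(numbers[i] * numbers[i])
--     return res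
-- ===== Notes on version B (the rewrite author's own statement) =====
-- stated objective: faster
-- what changed: Replaces the destructive pop(0)/pop() loop (pop(0) shifts the whole list each step) with a non-mutating two-pointer index pass from both ends.
import Mathlib
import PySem

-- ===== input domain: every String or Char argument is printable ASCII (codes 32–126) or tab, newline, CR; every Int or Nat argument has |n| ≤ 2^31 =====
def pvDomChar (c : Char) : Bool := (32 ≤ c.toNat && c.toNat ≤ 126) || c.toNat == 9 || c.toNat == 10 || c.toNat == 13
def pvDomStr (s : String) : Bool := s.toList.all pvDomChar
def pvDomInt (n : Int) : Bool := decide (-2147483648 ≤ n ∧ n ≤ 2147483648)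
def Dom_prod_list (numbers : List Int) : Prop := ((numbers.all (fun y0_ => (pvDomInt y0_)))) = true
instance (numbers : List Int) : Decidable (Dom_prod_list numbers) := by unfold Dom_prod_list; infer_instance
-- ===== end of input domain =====

-- B replaces A's destructive pop(0)/pop() loop by a non-mutating two-pointer index pass (faster:
-- no front-pop shifting). Python A empties its argument list in place; equivalence here is about
-- the RETURN value only (B does not mutate).

-- ===== PORT A =====
-- A: while numbers nonempty: first = pop(0); if still nonempty, append first * pop() (last),
-- else append first*first. pop() on rest = getLastD / dropLast (rest nonempty in that branch).
def prod_list (numbers : List Int) : List Int :=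
  match numbers with
  | [] => []
  | first :: rest =>
    if rest.isEmpty then [first * first]
    else first * rest.getLastD 0 :: prod_list rest.dropLast
termination_by numbers.length
decreasing_by simp [List.length_dropLast]

-- ===== PORT B =====
-- two-pointer loop: while i < j append numbers[i]*numbers[j], i += 1, j -= 1; then if i == j
-- append numbers[i]*numbers[i]. Indices are in range whenever read (proved below), so
-- getD i.toNat 0 is exactly Python's numbers[i].
def prodListAltLoop (numbers : List Int) (i j : Int) : List Int :=
  if i < j then
    numbers.getD i.toNat 0 * numbers.getD j.toNat 0 :: prodListAltLoop numbers (i + 1) (j - 1)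
  else if i = j then [numbers.getD i.toNat 0 * numbers.getD i.toNat 0]
  else []
termination_by (j - i + 1).toNat
decreasing_by omega

def prod_list_alt (numbers : List Int) : List Int :=
  prodListAltLoop numbers 0 (numbers.length - 1)

-- ===== PRECONDITION & SPEC =====
def Spec_prod_list (numbers : List Int) (out : List Int) : Prop := out = prod_list_alt numbers
instance (numbers : List Int) (out : List Int) : Decidable (Spec_prod_list numbers out) := by unfold Spec_prod_list; infer_instance

-- ===== CLAIM (what is proved, stated in full; the proofs are below) =====
def Claim_equal_prod_list : Prop := ∀ (numbers : List Int), Dom_prod_list numbers → Spec_prod_list numbers (prod_list numbers)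

-- ===== LEMMAS AND PROOFS =====

-- A on a "first :: middle ++ [last]" list produces first*last and recurses on the middle.
theorem prod_list_concat (x z : Int) (mid : List Int) :
    prod_list (x :: (mid ++ [z])) = x * z :: prod_list mid := by
  rw [prod_list.eq_def]
  simp

-- the segment numbers[i..j] (inclusive), as a list
def seg (l : List Int) (i j : Int) : List Int :=
  (l.drop i.toNat).take (j - i + 1).toNat

theorem seg_step (l : List Int) (i j : Int) (hi : 0 ≤ i) (hij : i < j) (hj : j < l.length) :
    seg l i j = l.getD i.toNat 0 :: (seg l (i + 1) (j - 1) ++ [l.getD j.toNat 0]) := by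
  unfold seg
  have hi' : i.toNat < l.length := by omega
  have hj' : j.toNat < l.length := by omega
  have h1 : l.drop i.toNat = l[i.toNat] :: l.drop (i.toNat + 1) := by
    rw [List.drop_eq_getElem_cons hi']
  have hn : (j - i + 1).toNat = ((j - 1) - (i + 1) + 1).toNat + 1 + 1 := by omega
  rw [h1, hn]
  have hidx : i.toNat + 1 = (i + 1).toNat := by omega
  rw [List.take_succ_cons]
  congr 1
  · rw [List.getD_eq_getElem _ _ hi']
  · rw [List.take_add_one]
    congr 1
    · rw [hidx]
    · have hlen : (l.drop (i.toNat + 1)).length = l.length - (i.toNat + 1) := by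
        simp
      have hin : ((j - 1) - (i + 1) + 1).toNat < (l.drop (i.toNat + 1)).length := by
        rw [hlen]; omega
      rw [List.getElem?_eq_getElem hin]
      have : (l.drop (i.toNat + 1))[((j - 1) - (i + 1) + 1).toNat] = l[j.toNat] := by
        rw [List.getElem_drop]
        congr 1
        omega
      rw [this, List.getD_eq_getElem _ _ hj']
      rfl

theorem seg_single (l : List Int) (i : Int) (hi : 0 ≤ i) (hil : i < l.length) :
    seg l i i = [l.getD i.toNat 0] := by
  unfold seg
  have hi' : i.toNat < l.length := by omega
  have : (i - i + 1).toNat = 1 := by omega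
  rw [this, List.take_one, List.head?_drop, List.getElem?_eq_getElem hi',
    List.getD_eq_getElem _ _ hi']
  rfl

theorem altLoop_eq_prod_seg (l : List Int) (i j : Int) (hi : 0 ≤ i)
    (hj : i ≤ j → j < l.length) :
    prodListAltLoop l i j = prod_list (seg l i j) := by
  rcases lt_trichotomy i j with h | h | h
  · have hj' : j < l.length := hj (le_of_lt h)
    rw [prodListAltLoop, if_pos h, seg_step l i j hi h hj', prod_list_concat]
    congr 1
    exact altLoop_eq_prod_seg l (i + 1) (j - 1) (by omega) (fun h' => by omega)
  · subst h
    have hil : i < l.length := hj le_rfl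
    rw [prodListAltLoop, if_neg (lt_irrefl i), if_pos rfl, seg_single l i hi hil]
    rw [prod_list.eq_def]
    simp
  · rw [prodListAltLoop, if_neg (by omega), if_neg (by omega)]
    unfold seg
    have : (j - i + 1).toNat = 0 := by omega
    rw [this, List.take_zero, prod_list.eq_def]
termination_by (j - i + 1).toNat
decreasing_by omega

-- ===== VERDICT (by name: the statement is the Claim_ definition above) =====
theorem prod_list_spec : Claim_equal_prod_list := by
  intro numbers _
  unfold Spec_prod_list prod_list_alt
  rw [altLoop_eq_prod_seg numbers 0 (numbers.length - 1) le_rfl (fun _ => by omega)]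
  unfold seg
  have h0 : ((0 : Int)).toNat = 0 := rfl
  have h1 : ((numbers.length : Int) - 1 - 0 + 1).toNat = numbers.length := by omega
  rw [h0, h1, List.drop_zero, List.take_length]
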